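-- pv_equiv track=rewrite | github.com/ganavi-20/test | flames.py | flames_result
-- ===== SOURCE A (Python) =====
-- def flames_result(count):
--     flames = list("FLAMES")
--     while len(flames) > 1:
--         split_index = (count % len(flames)) - 1
--         if split_index >= 0:
--             right = flames[split_index + 1:]
--             left = flames[:split_index]
--             flames = right + left
--         else:
--             flames = flames[:len(flames)-1]
--     return flames[0]
-- ===== SOURCE B (Python) =====
-- def flames_result(count):
--     flames = list("FLAMES")
--     idx = 0
--     while len(flames) > 1:
--         idx = (idx + count - 1) % len(flames)
--         flames.pop(idx)
--     return flames[0]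
-- ===== Notes on version B (the rewrite author's own statement) =====
-- stated objective: simpler
-- what changed: Replaces A's rotate-and-rebuild (slice right+left, with a special branch for count % len == 0) by the standard Josephus simulation: the list keeps its order and a maintained index idx = (idx + count - 1) % len selects the element to pop, no branching.
import Mathlib
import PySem

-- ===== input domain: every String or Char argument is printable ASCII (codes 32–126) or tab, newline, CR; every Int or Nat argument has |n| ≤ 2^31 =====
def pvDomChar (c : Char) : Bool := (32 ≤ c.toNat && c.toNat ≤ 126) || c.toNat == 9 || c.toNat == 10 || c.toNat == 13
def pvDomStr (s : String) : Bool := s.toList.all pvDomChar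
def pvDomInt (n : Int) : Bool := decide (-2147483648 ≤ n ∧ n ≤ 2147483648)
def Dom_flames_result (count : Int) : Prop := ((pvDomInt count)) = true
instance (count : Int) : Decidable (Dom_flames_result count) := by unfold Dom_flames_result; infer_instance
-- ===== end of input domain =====

-- B replaces A's rotate-and-rebuild slicing (with a special branch for count % len == 0)
-- by the standard Josephus simulation: an order-preserving list and a maintained index that is popped.
-- Both loops strictly shrink the 6-element list each pass, so fuel 6 runs them to completion.

-- ===== PORT A =====
-- while len(flames) > 1: split_index = (count % len(flames)) - 1; rotate-and-drop, or drop last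
def pvLoopA : Nat → List Char → Int → List Char
  | 0, flames, _ => flames
  | fuel + 1, flames, count =>
    if flames.length > 1 then
      if PySem.Int.mod count (flames.length : Int) - 1 ≥ 0 then
        pvLoopA fuel
          (PySem.List.slice flames (some (PySem.Int.mod count (flames.length : Int) - 1 + 1)) none ++
           PySem.List.slice flames none (some (PySem.Int.mod count (flames.length : Int) - 1))) count
      else
        pvLoopA fuel (PySem.List.slice flames none (some ((flames.length : Int) - 1))) count
    else flames

def flames_result (count : Int) : String :=
  match pvLoopA 6 ['F','L','A','M','E','S'] count with
  | c :: _ => String.mk [c]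
  | [] => ""

-- ===== PORT B =====
-- while len(flames) > 1: idx = (idx + count - 1) % len(flames); flames.pop(idx)
def pvLoopB : Nat → List Char → Int → Int → List Char
  | 0, flames, _, _ => flames
  | fuel + 1, flames, idx, count =>
    if flames.length > 1 then
      match PySem.List.pop? flames (PySem.Int.mod (idx + count - 1) (flames.length : Int)) with
      | some (_, rest) => pvLoopB fuel rest (PySem.Int.mod (idx + count - 1) (flames.length : Int)) count
      | none => flames
    else flames

def flames_result_alt (count : Int) : String :=
  match pvLoopB 6 ['F','L','A','M','E','S'] 0 count with
  | c :: _ => String.mk [c]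
  | [] => ""

-- ===== PRECONDITION & SPEC =====
def Spec_flames_result (count : Int) (out : String) : Prop := out = flames_result_alt count
instance (count : Int) (out : String) : Decidable (Spec_flames_result count out) := by unfold Spec_flames_result; infer_instance

-- ===== CLAIM (what is proved, stated in full; the proofs are below) =====
def Claim_equal_flames_result : Prop := ∀ (count : Int), Dom_flames_result count → Spec_flames_result count (flames_result count)

-- ===== LEMMAS AND PROOFS =====

-- every possible live length 2..6 divides 60, so both loops only see count through count % 60
theorem pv_len_dvd (n : Nat) (h2 : 1 < n) (h6 : n ≤ 6) : ((n : Int)) ∣ 60 := by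
  have : n = 2 ∨ n = 3 ∨ n = 4 ∨ n = 5 ∨ n = 6 := by omega
  rcases this with h|h|h|h|h <;> rw [h] <;> decide

theorem pv_mod_len (c c' : Int) (n : Nat) (h2 : 1 < n) (h6 : n ≤ 6)
    (h : c % 60 = c' % 60) :
    PySem.Int.mod c (n : Int) = PySem.Int.mod c' (n : Int) := by
  have hn : (0:Int) < (n : Int) := by omega
  rw [PySem.Int.mod_eq_emod_of_pos hn, PySem.Int.mod_eq_emod_of_pos hn]
  have hd := pv_len_dvd n h2 h6
  calc c % (n:Int) = c % 60 % (n:Int) := (Int.emod_emod_of_dvd c hd).symm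
    _ = c' % 60 % (n:Int) := by rw [h]
    _ = c' % (n:Int) := Int.emod_emod_of_dvd c' hd

theorem pvLoopA_mod (fuel : Nat) (l : List Char) (h6 : l.length ≤ 6) (count : Int) :
    pvLoopA fuel l count = pvLoopA fuel l (PySem.Int.mod count 60) := by
  induction fuel generalizing l with
  | zero => rfl
  | succ fuel ih =>
    rw [pvLoopA, pvLoopA]
    by_cases h : l.length > 1
    · have hn : (0:Int) < (l.length : Int) := by omega
      have hm0 : 0 ≤ PySem.Int.mod count (l.length : Int) := PySem.Int.mod_nonneg _ hn
      have hmlt : PySem.Int.mod count (l.length : Int) < (l.length : Int) := PySem.Int.mod_lt _ hn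
      have hmm : PySem.Int.mod (PySem.Int.mod count 60) (l.length : Int)
          = PySem.Int.mod count (l.length : Int) := by
        apply pv_mod_len _ _ _ h h6
        rw [PySem.Int.mod_eq_emod_of_pos (by norm_num : (0:Int) < 60)]
        omega
      rw [hmm]
      split_ifs with hs
      · apply ih
        rw [PySem.List.slice_from l (by omega), PySem.List.slice_to l (by omega)]
        simp only [List.length_append, List.length_drop, List.length_take]
        omega
      · apply ih
        rw [PySem.List.slice_to l (by omega)]
        simp only [List.length_take]
        omega
    · simp [h]

theorem pvLoopB_mod (fuel : Nat) (l : List Char) (h6 : l.length ≤ 6) (idx idx' count count' : Int)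
    (hsum : (idx + count) % 60 = (idx' + count') % 60)
    (hc : count % 60 = count' % 60) :
    pvLoopB fuel l idx count = pvLoopB fuel l idx' count' := by
  induction fuel generalizing l idx idx' with
  | zero => rfl
  | succ fuel ih =>
    rw [pvLoopB, pvLoopB]
    by_cases h : l.length > 1
    · have hi : PySem.Int.mod (idx + count - 1) (l.length : Int)
          = PySem.Int.mod (idx' + count' - 1) (l.length : Int) := by
        apply pv_mod_len _ _ _ h h6
        omega
      rw [hi]
      simp only [h, if_true]
      cases hp : PySem.List.pop? l (PySem.Int.mod (idx' + count' - 1) (l.length : Int)) with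
      | none => rfl
      | some r =>
        obtain ⟨c, rest⟩ := r
        apply ih
        · have := PySem.List.length_of_pop?_eq_some l hp
          simp at this
          omega
        · omega
    · simp [h]

theorem pv_key : ∀ k : Nat, k < 60 → flames_result (k : Int) = flames_result_alt (k : Int) := by
  decide

-- ===== VERDICT (by name: the statement is the Claim_ definition above) =====
theorem flames_result_spec : Claim_equal_flames_result := by
  intro count _
  unfold Spec_flames_result
  have h0 : (0:Int) < 60 := by norm_num
  have hmE : PySem.Int.mod count 60 = count % 60 := PySem.Int.mod_eq_emod_of_pos h0
  have hm0 : 0 ≤ PySem.Int.mod count 60 := PySem.Int.mod_nonneg _ h0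
  have hmlt : PySem.Int.mod count 60 < 60 := PySem.Int.mod_lt _ h0
  have hA : flames_result count = flames_result (PySem.Int.mod count 60) := by
    unfold flames_result
    rw [pvLoopA_mod 6 ['F','L','A','M','E','S'] (by decide) count]
  have hB : flames_result_alt count = flames_result_alt (PySem.Int.mod count 60) := by
    unfold flames_result_alt
    rw [pvLoopB_mod 6 ['F','L','A','M','E','S'] (by decide) 0 0 count (PySem.Int.mod count 60)
      (by omega) (by omega)]
  have hk : ((PySem.Int.mod count 60).toNat : Int) = PySem.Int.mod count 60 := by omega
  rw [hA, hB, ← hk]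
  exact pv_key (PySem.Int.mod count 60).toNat (by omega)
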